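-- pv_equiv track=rewrite | github.com/misqke/fastapi_pokiapi | routers/helpers.py | filter_by_weaknesses
-- ===== SOURCE A (Python) =====
-- def filter_by_weaknesses(weaknesses, data):
--     filtered_data = []
--     number_of_weaknesses = len(weaknesses)
--     for p in data:
--         matched_types = 0
--         for w in weaknesses:
--             if w in p["weaknesses"]:
--                 matched_types += 1
--         if matched_types == number_of_weaknesses:
--             filtered_data.append(p)
--     return filtered_data
-- ===== SOURCE B (Python) =====
-- def filter_by_weaknesses(weaknesses, data):
--     # Inverted loop: narrow the candidate list one weakness at a time.
--     remaining = list(data)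
--     for w in weaknesses:
--         remaining = [p for p in remaining if w in p["weaknesses"]]
--     return remaining
-- ===== Notes on version B (the rewrite author's own statement) =====
-- stated objective: alternative
-- what changed: Inverts the loop nesting: instead of scoring each record with a per-record counter over all weaknesses, B loops over the weaknesses and repeatedly narrows the candidate record list with a one-weakness filter pass, so the surviving list after the last pass is the answer.
import Mathlib
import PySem

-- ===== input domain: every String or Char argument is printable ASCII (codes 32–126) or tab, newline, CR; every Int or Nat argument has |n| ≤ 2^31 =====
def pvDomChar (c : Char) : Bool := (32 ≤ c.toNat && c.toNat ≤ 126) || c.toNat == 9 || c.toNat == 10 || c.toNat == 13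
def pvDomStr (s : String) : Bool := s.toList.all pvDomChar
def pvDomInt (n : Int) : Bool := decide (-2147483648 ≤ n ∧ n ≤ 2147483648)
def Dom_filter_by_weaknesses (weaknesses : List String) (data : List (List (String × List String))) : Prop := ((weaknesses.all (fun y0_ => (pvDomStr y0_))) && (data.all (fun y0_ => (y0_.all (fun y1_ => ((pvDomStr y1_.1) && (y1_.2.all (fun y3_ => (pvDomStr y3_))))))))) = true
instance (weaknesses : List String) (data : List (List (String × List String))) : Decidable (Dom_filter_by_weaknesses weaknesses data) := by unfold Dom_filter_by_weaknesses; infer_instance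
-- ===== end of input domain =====

-- B inverts the loop nesting: it narrows the candidate record list with one filter pass per weakness (alternative decomposition, not measured faster).

-- ===== PORT A =====
-- p["weaknesses"] ported as the dict lookup with default []; inside Pre_ that lookup is only counted when the key is present.
def filter_by_weaknesses (weaknesses : List String) (data : List (List (String × List String))) : List (List (String × List String)) :=
  data.foldl (fun filtered_data p =>
    let pw : List String := ((PySem.Dict.mk p).get? "weaknesses").getD []
    let matched_types : Int := weaknesses.foldl (fun m w => if pw.contains w then m + 1 else m) 0
    if matched_types = PySem.List.len weaknesses then filtered_data ++ [p] else filtered_data) []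

-- ===== PORT B =====
def filter_by_weaknesses_alt (weaknesses : List String) (data : List (List (String × List String))) : List (List (String × List String)) :=
  weaknesses.foldl
    (fun remaining w =>
      remaining.filter (fun p => (((PySem.Dict.mk p).get? "weaknesses").getD []).contains w))
    data

-- ===== PRECONDITION & SPEC =====
-- Pre_ excludes exactly the inputs where Python A raises KeyError: a nonempty weaknesses list with some
-- record lacking the "weaknesses" key (B raises there too).
def Pre_filter_by_weaknesses (weaknesses : List String) (data : List (List (String × List String))) : Prop :=
  weaknesses ≠ [] → ∀ p ∈ data, (PySem.Dict.mk p).contains "weaknesses" = true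
instance (weaknesses : List String) (data : List (List (String × List String))) : Decidable (Pre_filter_by_weaknesses weaknesses data) := by unfold Pre_filter_by_weaknesses; infer_instance

def pvWitness_filter_by_weaknesses : List String × (List (List (String × List String))) :=
  (["fire"], [[("weaknesses", ["fire", "water"])], [("weaknesses", ["grass"])]])

def Spec_filter_by_weaknesses (weaknesses : List String) (data : List (List (String × List String))) (out : List (List (String × List String))) : Prop := out = filter_by_weaknesses_alt weaknesses data
instance (weaknesses : List String) (data : List (List (String × List String))) (out : List (List (String × List String))) : Decidable (Spec_filter_by_weaknesses weaknesses data out) := by unfold Spec_filter_by_weaknesses; infer_instance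

-- ===== CLAIM =====
def Claim_equal_filter_by_weaknesses : Prop := ∀ (weaknesses : List String) (data : List (List (String × List String))), Dom_filter_by_weaknesses weaknesses data → Pre_filter_by_weaknesses weaknesses data → Spec_filter_by_weaknesses weaknesses data (filter_by_weaknesses weaknesses data)

-- ===== LEMMAS AND PROOFS =====

-- A's per-record test (counter reaches len(weaknesses)) coincides with "every weakness is in the record's list".
lemma pv_record_test (weaknesses : List String) (pw : List String) :
    (decide ((weaknesses.foldl (fun m w => if pw.contains w then m + 1 else m) (0 : Int)) = PySem.List.len weaknesses))
      = weaknesses.all (fun w => pw.contains w) := by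
  rw [PySem.List.foldl_if_add_one]
  by_cases h : ∀ w ∈ weaknesses, pw.contains w = true
  · have hc : weaknesses.countP (fun w => pw.contains w) = weaknesses.length :=
      List.countP_eq_length.mpr h
    simp [hc, PySem.List.len_eq]
    intro x hx
    exact List.contains_iff_mem.mp (h x hx)
  · have hc : weaknesses.countP (fun w => pw.contains w) ≠ weaknesses.length := by
      intro he; exact h (List.countP_eq_length.mp he)
    have hne : ((weaknesses.countP (fun w => pw.contains w) : Int) ≠ (weaknesses.length : Int)) := by
      exact_mod_cast hc
    simp [PySem.List.len_eq, hne]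
    push Not at h
    obtain ⟨x, hx, hxc⟩ := h
    exact ⟨x, hx, fun hm => hxc (List.contains_iff_mem.mpr hm)⟩

-- Iterated one-predicate filtering equals one filter by the conjunction of all predicates.
lemma pv_iterated_filter {α β : Type} (ws : List β) (q : β → α → Bool) (xs : List α) :
    ws.foldl (fun r w => r.filter (q w)) xs = xs.filter (fun x => ws.all (fun w => q w x)) := by
  induction ws generalizing xs with
  | nil => simp
  | cons w ws ih =>
    simp only [List.foldl_cons, ih, List.filter_filter, List.all_cons]
    exact List.filter_congr (fun x _ => Bool.and_comm _ _)

-- ===== VERDICT =====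
theorem filter_by_weaknesses_spec : Claim_equal_filter_by_weaknesses := by
  intro weaknesses data _hdom _hpre
  unfold Spec_filter_by_weaknesses filter_by_weaknesses filter_by_weaknesses_alt
  rw [PySem.List.foldl_append_ite_eq_filter,
      pv_iterated_filter weaknesses (fun w p => (((PySem.Dict.mk p).get? "weaknesses").getD []).contains w) data]
  simp only [List.nil_append]
  apply List.filter_congr
  intro p _hp
  exact pv_record_test weaknesses (((PySem.Dict.mk p).get? "weaknesses").getD [])
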